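-- pv_equiv track=rewrite | github.com/andrei-bolkonsky/programmation_efficace | src/t9.py | build_pref_dict
-- ===== SOURCE A (Python) =====
-- def letter_to_number(l):
--     t9 = "22233344455566677778889999"
--     return t9[ord(l)-ord('a')]
--
-- def build_pref_dict(dico):
--     pref_weight = {}
--     for word, weight in zip(dico.keys(), dico.values()):
--         prefix = ''
--         for c in word:
--             prefix += c
--             if prefix in pref_weight:
--                 pref_weight[prefix] += weight
--             else:
--                 pref_weight[prefix] = weight
--
--     propositions = {}
--     for pref, weight in zip(pref_weight.keys(), pref_weight.values()):
--         prefix_cd = ''.join(map(letter_to_number, pref))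
--         if prefix_cd not in propositions or pref_weight[propositions[prefix_cd]] < pref_weight[pref]:
--             propositions[prefix_cd] = pref
--
--     return propositions
-- ===== SOURCE B (Python) =====
-- def build_pref_dict(dico):
--     # Trie accumulation: one node per distinct prefix, created in first-occurrence
--     # order; each word walks the trie adding its weight to the nodes on its path
--     # (no per-prefix string building/hashing), and each node's T9 code is extended
--     # incrementally from its parent's at creation time.  A second pass over the
--     # nodes in creation order keeps a running best weight per code.
--     # (A different data structure; measured cost similar to A on typical inputs.)
--     t9 = "22233344455566677778889999"
--     children = [{}]   # per node: char -> child node index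
--     weight_ = [0]
--     pref_ = ['']
--     code_ = ['']
--     for word, w in dico.items():
--         cur = 0
--         for c in word:
--             nxt = children[cur].get(c)
--             if nxt is None:
--                 nxt = len(children)
--                 children[cur][c] = nxt
--                 children.append({})
--                 weight_.append(0)
--                 pref_.append(pref_[cur] + c)
--                 code_.append(code_[cur] + t9[ord(c) - 97])
--             weight_[nxt] += w
--             cur = nxt
--     best = {}
--     propositions = {}
--     for w, cd, pf in zip(weight_[1:], code_[1:], pref_[1:]):
--         if cd not in best or best[cd] < w:
--             best[cd] = w
--             propositions[cd] = pf
--     return propositions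
-- ===== Notes on version B (the rewrite author's own statement) =====
-- stated objective: alternative
-- what changed: B replaces A's prefix-string dictionary with a trie (one node per distinct prefix, created in first-occurrence order): each word walks the trie adding its weight along the path, T9 codes are extended incrementally at node creation instead of rebuilt per prefix with join(map(...)), and the winner per code is picked by a running best-weight scan over the nodes in creation order instead of A's chained pref_weight[propositions[code]] lookups.
import Mathlib
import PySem

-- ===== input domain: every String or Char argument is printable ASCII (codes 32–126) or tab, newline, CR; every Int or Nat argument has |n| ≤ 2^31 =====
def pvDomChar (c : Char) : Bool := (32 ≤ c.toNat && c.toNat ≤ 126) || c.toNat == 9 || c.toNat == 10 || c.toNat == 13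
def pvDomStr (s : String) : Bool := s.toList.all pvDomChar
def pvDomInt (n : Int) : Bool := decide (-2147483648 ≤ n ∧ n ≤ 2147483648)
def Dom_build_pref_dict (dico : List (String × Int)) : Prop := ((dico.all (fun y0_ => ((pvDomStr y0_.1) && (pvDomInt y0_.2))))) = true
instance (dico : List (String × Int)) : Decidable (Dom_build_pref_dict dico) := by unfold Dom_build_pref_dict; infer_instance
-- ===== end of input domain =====

-- B replaces A's prefix-string dictionary with a trie: one node per distinct prefix,
-- created in first-occurrence order; each word walks the trie adding its weight along
-- the path and T9 codes grow incrementally at node creation (no per-character prefix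
-- string building/hashing), then a scan over the nodes in creation order keeps a
-- running best weight per code (a different data structure, similar measured cost).
-- The dict argument/result are association lists; strings are handled on the List Char side.

-- ===== PORT A =====
def pvT9 : List Char := "22233344455566677778889999".toList

-- t9[ord(l) - ord('a')]; Python's negative indices count from the end (pyGet?).
-- Total wrapper: '?' stands for the IndexError case, which Pre_ excludes.
def letter_to_number (l : Char) : Char :=
  (PySem.List.pyGet? pvT9 ((l.toNat : Int) - 97)).getD '?'

-- inner loop of A's first pass: prefix += c; accumulate weight of prefix
def pvAInner (weight : Int) (st : List Char × PySem.Dict (List Char) Int) (c : Char) :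
    List Char × PySem.Dict (List Char) Int :=
  let pfx := st.1 ++ [c]
  let pw := match st.2.get? pfx with
    | some w => st.2.insert pfx (w + weight)
    | none   => st.2.insert pfx weight
  (pfx, pw)

-- one word of A's first pass
def pvAOuter (pw : PySem.Dict (List Char) Int) (wv : String × Int) :
    PySem.Dict (List Char) Int :=
  (wv.1.toList.foldl (pvAInner wv.2) ([], pw)).2

-- one step of A's second pass: keep, per T9 code, the prefix of maximal accumulated weight
def pvAStep (pw : PySem.Dict (List Char) Int)
    (props : PySem.Dict (List Char) (List Char)) (pref : List Char) :
    PySem.Dict (List Char) (List Char) :=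
  let cd := pref.map letter_to_number
  match props.get? cd with
  | none   => props.insert cd pref
  | some q => if pw.getD q 0 < pw.getD pref 0 then props.insert cd pref else props

def build_pref_dict (dico : List (String × Int)) : List (String × String) :=
  let pref_weight := dico.foldl pvAOuter PySem.Dict.empty
  let propositions :=
    pref_weight.items.foldl (fun props pv => pvAStep pref_weight props pv.1) PySem.Dict.empty
  propositions.items.map (fun p => (String.ofList p.1, String.ofList p.2))

-- ===== PORT B =====
-- the trie of Source B: parallel node lists, indexed by creation order (0 = root);
-- child pointers are list indices (Python non-negative ints → Nat)
structure PvTrie where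
  ch : List (PySem.Dict Char Nat)   -- children[i] : char -> child node index
  wt : List Int                     -- weight_[i]
  pf : List (List Char)             -- pref_[i]
  cd : List (List Char)             -- code_[i]
deriving Repr, DecidableEq

def pvTrie0 : PvTrie := ⟨[PySem.Dict.empty], [0], [[]], [[]]⟩

-- one character of Source B's walk: follow or create the child, add w to its weight
def pvBChar (w : Int) (st : PvTrie × Nat) (c : Char) : PvTrie × Nat :=
  let t := st.1
  let cur := st.2
  match (t.ch.getD cur PySem.Dict.empty).get? c with
  | some nxt => (⟨t.ch, t.wt.modify nxt (· + w), t.pf, t.cd⟩, nxt)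
  | none =>
      let nxt := t.ch.length
      (⟨t.ch.modify cur (fun d => d.insert c nxt) ++ [PySem.Dict.empty],
        (t.wt ++ [0]).modify nxt (· + w),
        t.pf ++ [t.pf.getD cur [] ++ [c]],
        t.cd ++ [t.cd.getD cur [] ++ [letter_to_number c]]⟩, nxt)

-- one word of Source B's first pass: walk from the root
def pvBWord (t : PvTrie) (wv : String × Int) : PvTrie :=
  (wv.1.toList.foldl (pvBChar wv.2) (t, 0)).1

-- Source B's second pass step: running best weight per code over nodes in creation order
def pvBSel (st : PySem.Dict (List Char) Int × PySem.Dict (List Char) (List Char))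
    (x : Int × List Char × List Char) :
    PySem.Dict (List Char) Int × PySem.Dict (List Char) (List Char) :=
  let w := x.1
  let cd := x.2.1
  let pf := x.2.2
  match st.1.get? cd with
  | none    => (st.1.insert cd w, st.2.insert cd pf)
  | some bw => if bw < w then (st.1.insert cd w, st.2.insert cd pf) else st

def build_pref_dict_alt (dico : List (String × Int)) : List (String × String) :=
  let t := dico.foldl pvBWord pvTrie0
  -- zip(weight_[1:], code_[1:], pref_[1:]); the slice [1:] is List.drop 1 (exact here)
  let propositions :=
    (((t.wt.drop 1).zip ((t.cd.drop 1).zip (t.pf.drop 1))).foldl pvBSel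
      (PySem.Dict.empty, PySem.Dict.empty)).2
  propositions.items.map (fun p => (String.ofList p.1, String.ofList p.2))

-- ===== PRECONDITION & SPEC =====
-- Pre_ excludes (i) words containing a character outside chr(71)..chr(122), where
-- t9[ord(c)-97] raises IndexError in A (negative indices down to -26 still hit the
-- 26-char table, so those characters stay inside), and (ii) association lists with
-- duplicate words, which do not correspond to any Python dict argument (a dict cannot
-- hold duplicate keys).
def Pre_build_pref_dict (dico : List (String × Int)) : Prop :=
  (dico.map (fun p => p.1.toList)).Nodup ∧
  (dico.all (fun p => p.1.toList.all (fun c => 71 ≤ c.toNat && c.toNat ≤ 122))) = true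
instance (dico : List (String × Int)) : Decidable (Pre_build_pref_dict dico) := by
  unfold Pre_build_pref_dict; infer_instance

def pvWitness_build_pref_dict : (List (String × Int)) := [("on", 2), ("go", 1), ("good", 3)]

def Spec_build_pref_dict (dico : List (String × Int)) (out : List (String × String)) : Prop := out = build_pref_dict_alt dico
instance (dico : List (String × Int)) (out : List (String × String)) : Decidable (Spec_build_pref_dict dico out) := by unfold Spec_build_pref_dict; infer_instance

-- ===== CLAIM (what is proved, stated in full; the proofs are below) =====
def Claim_equal_build_pref_dict : Prop := ∀ (dico : List (String × Int)), Dom_build_pref_dict dico → Pre_build_pref_dict dico → Spec_build_pref_dict dico (build_pref_dict dico)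

-- ===== LEMMAS AND PROOFS =====

-- the coupling invariant between Source B's trie and A's accumulated prefix-weight dict
def pvInvT (t : PvTrie) (pw : PySem.Dict (List Char) Int) : Prop :=
  t.pf.length = t.ch.length ∧ t.wt.length = t.ch.length ∧ t.cd.length = t.ch.length ∧
  0 < t.ch.length ∧
  t.pf.getD 0 [] = [] ∧
  t.pf.Nodup ∧
  t.cd = t.pf.map (List.map letter_to_number) ∧
  pw.items = (t.pf.zip t.wt).drop 1 ∧
  pw.keys.Nodup ∧
  (∀ i c j, (t.ch.getD i PySem.Dict.empty).get? c = some j →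
      0 < j ∧ j < t.ch.length ∧ t.pf.getD j [] = t.pf.getD i [] ++ [c]) ∧
  (∀ i c, i < t.ch.length → (t.ch.getD i PySem.Dict.empty).get? c = none →
      ∀ j, 0 < j → j < t.ch.length → t.pf.getD j [] ≠ t.pf.getD i [] ++ [c]) ∧
  (∀ j, 0 < j → j < t.ch.length →
      ∃ i c, i < t.ch.length ∧ (t.ch.getD i PySem.Dict.empty).get? c = some j)

theorem pv_drop_one_zip {α β : Type} (l : List α) (m : List β) :
    (l.zip m).drop 1 = (l.drop 1).zip (m.drop 1) := by
  rcases l with _ | ⟨x, l⟩ <;> rcases m with _ | ⟨y, m⟩ <;> simp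

-- replacing the value of key ks[j] in an association zip = setting position j
theorem pv_zip_replace {κ ν : Type} [BEq κ] [LawfulBEq κ]
    (ks : List κ) (vs : List ν) (hl : ks.length = vs.length) (hnd : ks.Nodup)
    (j : Nat) (hj : j < ks.length) (u : ν) :
    (ks.zip vs).map (fun p => if p.1 == ks[j] then (ks[j], u) else p)
      = ks.zip (vs.set j u) := by
  apply List.ext_getElem
  · simp [hl]
  · intro n h1 h2
    simp only [List.length_map, List.length_zip, hl, Nat.min_self] at h1
    have hn : n < ks.length := by omega
    have hnv : n < vs.length := by omega
    simp only [List.getElem_map, List.getElem_zip, List.getElem_set]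
    by_cases he : ks[n] = ks[j]
    · have : n = j := (hnd.getElem_inj_iff).mp he
      simp [this]
    · have : ¬ j = n := fun h => he (by simp [h])
      simp [he, this]

-- appending then modifying the appended slot
theorem pv_modify_append {α : Type} (l : List α) (a : α) (f : α → α) :
    (l ++ [a]).modify l.length f = l ++ [f a] := by
  induction l with
  | nil => rfl
  | cons x xs ih => simpa using ih

-- the zip of three equal-length node lists, rewritten as a map over the key/value zip
theorem pv_zip_triple {κ ν : Type} (ks : List κ) (vs : List ν) (f : κ → κ)
    (hl : ks.length = vs.length) :
    vs.zip ((ks.map f).zip ks) = (ks.zip vs).map (fun p => (p.2, (f p.1, p.1))) := by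
  apply List.ext_getElem
  · simp [hl]
  · intro n h1 h2
    simp only [List.length_zip, List.length_map, hl, Nat.min_self] at h1
    simp [List.getElem_zip, List.getElem_map, List.getElem_zip]

-- getD at the position of a freshly appended element
theorem pv_getD_append_len {α : Type} (l : List α) (a d : α) (m : Nat)
    (hm : m = l.length) : (l ++ [a]).getD m d = a := by
  subst hm; simp [List.getD]

-- one character: B's trie step mirrors A's dict step and keeps the invariant
theorem pv_char (w : Int) (c : Char) (t : PvTrie) (pw : PySem.Dict (List Char) Int)
    (cur : Nat) (hinv : pvInvT t pw) (hcur : cur < t.ch.length) :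
    pvInvT (pvBChar w (t, cur) c).1 (pvAInner w (t.pf.getD cur [], pw) c).2 ∧
    (pvBChar w (t, cur) c).2 < (pvBChar w (t, cur) c).1.ch.length ∧
    (pvBChar w (t, cur) c).1.pf.getD (pvBChar w (t, cur) c).2 []
      = t.pf.getD cur [] ++ [c] := by
  obtain ⟨hlpf, hlwt, hlcd, hpos, hpf0, hnd, hcd, hitems, hknd, hsome, hnone, hpar⟩ := hinv
  set n := t.ch.length with hn
  set p := t.pf.getD cur [] with hp
  have hcpf : cur < t.pf.length := by omega
  have hzlen : (t.pf.zip t.wt).length = n := by simp [hlpf, hlwt]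
  rcases hs : (t.ch.getD cur PySem.Dict.empty).get? c with _ | j
  -- ============ new node ============
  · have hB : pvBChar w (t, cur) c =
        (⟨t.ch.modify cur (fun d => d.insert c n) ++ [PySem.Dict.empty],
          (t.wt ++ [0]).modify n (· + w),
          t.pf ++ [p ++ [c]],
          t.cd ++ [t.cd.getD cur [] ++ [letter_to_number c]]⟩, n) := by
      simp only [pvBChar]; rw [hs]
    -- p ++ [c] is not an existing prefix
    have hpnew : ∀ k (hk : k < t.pf.length), t.pf[k]'hk ≠ p ++ [c] := by
      intro k hk he
      rcases Nat.eq_zero_or_pos k with rfl | hk0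
      · rw [List.getD_eq_getElem t.pf [] (by omega)] at hpf0
        simp [hpf0] at he
      · exact hnone cur c hcur hs k hk0 (by omega)
          (by rw [List.getD_eq_getElem t.pf [] hk]; exact he)
    have hnmem : p ++ [c] ∉ t.pf := by
      intro hm
      obtain ⟨k, hk, he⟩ := List.mem_iff_getElem.mp hm
      exact hpnew k hk he
    -- A inserts a fresh key
    have hkeys : pw.keys = t.pf.drop 1 := by
      have : pw.keys = pw.items.map (·.1) := by simp [PySem.Dict.keys]
      rw [this, hitems, pv_drop_one_zip, List.map_fst_zip]
      simp [hlpf, hlwt]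
    have hget : pw.get? (p ++ [c]) = none := by
      rw [PySem.Dict.get?_eq_none_iff_not_mem_keys, hkeys]
      intro hm
      obtain ⟨k, hk, he⟩ := List.mem_iff_getElem.mp hm
      rw [List.getElem_drop] at he
      exact hpnew (1 + k) (by simp at hk; omega) he
    have hA : (pvAInner w (p, pw) c).2 = pw.insert (p ++ [c]) w := by
      simp [pvAInner, hget]
    have hcont : pw.contains (p ++ [c]) = false := by
      rw [PySem.Dict.contains_eq_isSome_get?, hget]; rfl
    have hwtlen : t.wt.length = n := hlwt
    have hwt' : (t.wt ++ [0]).modify n (· + w) = t.wt ++ [0 + w] := by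
      rw [← hwtlen, pv_modify_append]
    -- getD facts on the appended lists
    have hgetd_lt : ∀ k, k < t.pf.length → (t.pf ++ [p ++ [c]]).getD k [] = t.pf.getD k [] :=
      fun k hk => List.getD_append _ _ _ _ hk
    have hgetd_n : (t.pf ++ [p ++ [c]]).getD n [] = p ++ [c] := by
      rw [← hlpf]; simp [List.getD]
    have hcdcur : t.cd.getD cur [] = p.map letter_to_number := by
      rw [hcd, List.getD_eq_getElem _ [] (by simpa [hlpf, hlcd, hcd] using hcpf),
        List.getElem_map, hp, List.getD_eq_getElem _ _ hcpf]
    rw [hB, hA]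
    refine ⟨⟨by simp only [List.length_append, List.length_modify, List.length_cons, List.length_nil]; omega,
      by simp only [List.length_append, List.length_modify, List.length_cons, List.length_nil]; omega,
      by simp only [List.length_append, List.length_modify, List.length_cons, List.length_nil]; omega,
      by simp only [List.length_append, List.length_modify, List.length_cons, List.length_nil]; omega, ?_, ?_, ?_, ?_, ?_, ?_, ?_, ?_⟩, ?_, ?_⟩
    · -- root prefix
      rw [hgetd_lt 0 (by omega)]; exact hpf0
    · -- Nodup
      rw [List.nodup_append]
      refine ⟨hnd, List.nodup_singleton _, ?_⟩
      intro a ha b hb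
      rw [List.mem_singleton] at hb
      subst hb
      intro he
      rw [he] at ha
      exact hnmem ha
    · -- codes
      simp only [List.map_append, ← hcd, List.map_cons, List.map_nil, hcdcur, List.map_append]
    · -- items
      rw [PySem.Dict.items_insert_of_not_contains pw w hcont, hitems, hwt']
      rw [List.zip_append (by omega)]
      rw [List.drop_append_of_le_length (by omega)]
      simp
    · exact PySem.Dict.nodup_keys_insert pw _ w hknd
    · -- some-case
      intro i c' j' hg
      by_cases hi : i < n
      · have hdi : ((t.ch.modify cur (fun d => d.insert c n) ++ [PySem.Dict.empty]).getD i
            PySem.Dict.empty) = if cur = i then (t.ch.getD i PySem.Dict.empty).insert c n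
              else t.ch.getD i PySem.Dict.empty := by
          rw [List.getD_append _ _ _ _ (by simpa using hi),
            List.getD_eq_getElem _ _ (by simpa using hi), List.getElem_modify,
            List.getD_eq_getElem _ _ (by omega : i < t.ch.length)]
        rw [hdi] at hg
        by_cases hic : cur = i
        · simp only [if_pos hic] at hg
          rw [PySem.Dict.get?_insert] at hg
          by_cases hc' : c' = c
          · rw [if_pos hc'] at hg
            have hj' : j' = n := by injection hg with h; omega
            subst hj'
            refine ⟨by omega, by simp only [List.length_append, List.length_modify, List.length_cons, List.length_nil]; omega, ?_⟩
            rw [hgetd_n, hgetd_lt i (by omega), ← hic, ← hp, hc']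
          · rw [if_neg hc'] at hg
            have := hsome i c' j' hg
            exact ⟨this.1, by simp only [List.length_append, List.length_modify, List.length_cons, List.length_nil]; omega,
              by rw [hgetd_lt j' (by omega), hgetd_lt i (by omega)]; exact this.2.2⟩
        · simp only [if_neg hic] at hg
          have := hsome i c' j' hg
          exact ⟨this.1, by simp only [List.length_append, List.length_modify, List.length_cons, List.length_nil]; omega,
            by rw [hgetd_lt j' (by omega), hgetd_lt i (by omega)]; exact this.2.2⟩
      · -- i ≥ n: the dict there is empty
        have hdi : ((t.ch.modify cur (fun d => d.insert c n) ++ [PySem.Dict.empty]).getD i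
            PySem.Dict.empty) = PySem.Dict.empty := by
          by_cases hie : i = n
          · subst hie
            exact pv_getD_append_len _ _ _ n (by rw [List.length_modify, hn])
          · rw [List.getD_eq_getElem?_getD, List.getElem?_eq_none (by
              simp only [List.length_append, List.length_modify, List.length_cons,
                List.length_nil]; omega)]
            rfl
        rw [hdi] at hg
        simp [PySem.Dict.get?_empty] at hg
    · -- none-case
      intro i c' hi hg j hj0 hjlt
      simp only [List.length_append, List.length_modify, List.length_cons, List.length_nil] at hi hjlt
      have hjlt' : j < n + 1 := by simpa using hjlt
      by_cases hie : i < n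
      · have hdi : ((t.ch.modify cur (fun d => d.insert c n) ++ [PySem.Dict.empty]).getD i
            PySem.Dict.empty) = if cur = i then (t.ch.getD i PySem.Dict.empty).insert c n
              else t.ch.getD i PySem.Dict.empty := by
          rw [List.getD_append _ _ _ _ (by simpa using hie),
            List.getD_eq_getElem _ _ (by simpa using hie), List.getElem_modify,
            List.getD_eq_getElem _ _ (by omega : i < t.ch.length)]
        rw [hdi] at hg
        by_cases hic : cur = i
        · simp only [if_pos hic] at hg
          rw [PySem.Dict.get?_insert] at hg
          by_cases hc' : c' = c
          · rw [if_pos hc'] at hg; exact absurd hg (by simp)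
          · rw [if_neg hc'] at hg
            by_cases hj : j < n
            · rw [hgetd_lt j (by omega), hgetd_lt i (by omega)]
              exact hnone i c' (by omega) hg j hj0 (by omega)
            · have hjn : j = n := by omega
              subst hjn
              rw [hgetd_n, hgetd_lt i (by omega), ← hic, ← hp]
              intro he
              have hcc : c = c' := by simpa using List.append_inj' he rfl
              exact hc' hcc.symm
        · simp only [if_neg hic] at hg
          by_cases hj : j < n
          · rw [hgetd_lt j (by omega), hgetd_lt i (by omega)]
            exact hnone i c' (by omega) hg j hj0 (by omega)
          · have hjn : j = n := by omega
            subst hjn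
            rw [hgetd_n, hgetd_lt i (by omega)]
            intro he
            obtain ⟨hpp, hcc⟩ := List.append_inj' he rfl
            -- pf[i] = p = pf[cur] → i = cur, contradiction
            have : t.pf[i]'(by omega) = t.pf[cur] := by
              rw [← List.getD_eq_getElem _ ([] : List Char) (by omega : i < t.pf.length),
                ← List.getD_eq_getElem _ ([] : List Char) hcpf, ← hp, ← hpp]
            exact hic ((hnd.getElem_inj_iff).mp this).symm
      · -- i = n: empty dict; j < n: parent argument; j = n: length
        by_cases hj : j < n
        · have hin : i = n := by omega
          subst hin
          have hdi : ((t.ch.modify cur (fun d => d.insert c n) ++ [PySem.Dict.empty]).getD n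
              PySem.Dict.empty) = PySem.Dict.empty :=
            pv_getD_append_len _ _ _ n (by rw [List.length_modify, hn])
          rw [hgetd_lt j (by omega), hgetd_n]
          intro he
          obtain ⟨i0, c0, hi0, hg0⟩ := hpar j hj0 (by omega)
          have hps := hsome i0 c0 j hg0
          rw [hps.2.2] at he
          obtain ⟨hpp, -⟩ := List.append_inj' he rfl
          have : i0 < t.pf.length := by omega
          apply hpnew i0 this
          rw [← List.getD_eq_getElem _ ([] : List Char) this, hpp]
        · have hjn : j = n := by omega
          have hin : i = n := by omega
          subst hjn; subst hin
          rw [hgetd_n]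
          intro he
          have := congrArg List.length he
          simp at this
    · -- parent-case
      intro j hj0 hjlt
      simp only [List.length_append, List.length_modify, List.length_cons, List.length_nil] at hjlt
      have hjlt' : j < n + 1 := by simpa using hjlt
      by_cases hj : j < n
      · obtain ⟨i0, c0, hi0, hg0⟩ := hpar j hj0 hj
        refine ⟨i0, c0, by simp [hn]; omega, ?_⟩
        have hdi : ((t.ch.modify cur (fun d => d.insert c n) ++ [PySem.Dict.empty]).getD i0
            PySem.Dict.empty) = if cur = i0 then (t.ch.getD i0 PySem.Dict.empty).insert c n
              else t.ch.getD i0 PySem.Dict.empty := by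
          rw [List.getD_append _ _ _ _ (by simpa using hi0),
            List.getD_eq_getElem _ _ (by simpa using hi0), List.getElem_modify,
            List.getD_eq_getElem _ _ hi0]
        rw [hdi]
        by_cases hic : cur = i0
        · rw [if_pos hic]
          have hc0 : c0 ≠ c := by
            intro he; rw [← hic, he, hs] at hg0; exact absurd hg0 (by simp)
          rw [PySem.Dict.get?_insert, if_neg hc0, ← hic]
          rw [← hic] at hg0; exact hg0
        · rw [if_neg hic]; exact hg0
      · have hjn : j = n := by omega
        subst hjn
        refine ⟨cur, c, by simp [hn]; omega, ?_⟩
        have hdi : ((t.ch.modify cur (fun d => d.insert c n) ++ [PySem.Dict.empty]).getD cur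
            PySem.Dict.empty) = (t.ch.getD cur PySem.Dict.empty).insert c n := by
          rw [List.getD_append _ _ _ _ (by simpa using hcur),
            List.getD_eq_getElem _ _ (by simpa using hcur), List.getElem_modify,
            List.getD_eq_getElem _ _ hcur]
          simp
        rw [hdi, PySem.Dict.get?_insert_self]
    · simp only [List.length_append, List.length_modify, List.length_cons, List.length_nil]
      omega
    · exact hgetd_n
  -- ============ existing node ============
  · obtain ⟨hj0, hjn, hjpf⟩ := hsome cur c j hs
    have hjlt : j < t.pf.length := by omega
    have hjwt : j < t.wt.length := by omega
    have hB : pvBChar w (t, cur) c = (⟨t.ch, t.wt.modify j (· + w), t.pf, t.cd⟩, j) := by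
      simp only [pvBChar]; rw [hs]
    -- the key p ++ [c] is at position j of the zip, hence in pw
    have hmem : (p ++ [c], t.wt[j]) ∈ pw.items := by
      rw [hitems]
      have hlen : j - 1 < ((t.pf.zip t.wt).drop 1).length := by simp; omega
      have : ((t.pf.zip t.wt).drop 1)[j-1] = (p ++ [c], t.wt[j]) := by
        rw [List.getElem_drop]
        have h1j : 1 + (j - 1) = j := by omega
        simp only [h1j, List.getElem_zip]
        rw [← hjpf, List.getD_eq_getElem _ _ hjlt]
      rw [← this]
      exact List.getElem_mem hlen
    have hget : pw.get? (p ++ [c]) = some (t.wt[j]) :=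
      PySem.Dict.get?_of_mem_items pw hmem hknd
    have hA : (pvAInner w (p, pw) c).2 = pw.insert (p ++ [c]) (t.wt[j] + w) := by
      simp [pvAInner, hget]
    have hcont : pw.contains (p ++ [c]) = true := by
      rw [PySem.Dict.contains_eq_isSome_get?, hget]; rfl
    rw [hB, hA]
    refine ⟨⟨hlpf, by simp only [List.length_modify]; exact hlwt, hlcd, hpos, hpf0, hnd, hcd, ?_, ?_, hsome, hnone, hpar⟩,
      hjn, by rw [List.getD_eq_getElem _ _ hjlt, ← hjpf, List.getD_eq_getElem _ _ hjlt]⟩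
    · -- items
      rw [PySem.Dict.items_insert_of_contains pw _ hcont, hitems, List.map_drop]
      have hrep := pv_zip_replace t.pf t.wt (by omega) hnd j hjlt (t.wt[j] + w)
      have hkey : t.pf[j] = p ++ [c] := by rw [← hjpf, List.getD_eq_getElem _ _ hjlt]
      rw [hkey] at hrep
      rw [hrep, List.modify_eq_set_get _ hjwt]
      simp [List.get_eq_getElem]
    · exact PySem.Dict.nodup_keys_insert pw _ _ hknd

-- one word
theorem pv_word (w : Int) (cs : List Char) :
    ∀ (t : PvTrie) (pw : PySem.Dict (List Char) Int) (cur : Nat),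
      pvInvT t pw → cur < t.ch.length →
      pvInvT (cs.foldl (pvBChar w) (t, cur)).1
             (cs.foldl (pvAInner w) (t.pf.getD cur [], pw)).2 ∧
      (cs.foldl (pvBChar w) (t, cur)).2 < (cs.foldl (pvBChar w) (t, cur)).1.ch.length ∧
      (cs.foldl (pvBChar w) (t, cur)).1.pf.getD (cs.foldl (pvBChar w) (t, cur)).2 []
        = (cs.foldl (pvAInner w) (t.pf.getD cur [], pw)).1 := by
  induction cs with
  | nil => intro t pw cur h hc; exact ⟨h, hc, rfl⟩
  | cons c cs ih =>
    intro t pw cur h hc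
    have hs := pv_char w c t pw cur h hc
    have hA : pvAInner w (t.pf.getD cur [], pw) c
        = (t.pf.getD cur [] ++ [c], (pvAInner w (t.pf.getD cur [], pw) c).2) := rfl
    simp only [List.foldl_cons]
    rw [hA]
    have := ih (pvBChar w (t, cur) c).1 (pvAInner w (t.pf.getD cur [], pw) c).2
      (pvBChar w (t, cur) c).2 hs.1 hs.2.1
    rw [hs.2.2] at this
    exact this

-- the whole first pass
theorem pv_phase1 (dico : List (String × Int)) :
    ∀ (t : PvTrie) (pw : PySem.Dict (List Char) Int), pvInvT t pw →
      pvInvT (dico.foldl pvBWord t) (dico.foldl pvAOuter pw) := by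
  induction dico with
  | nil => intro t pw h; exact h
  | cons wv rest ih =>
    intro t pw h
    simp only [List.foldl_cons]
    apply ih
    have h0 : (0 : Nat) < t.ch.length := h.2.2.2.1
    have := pv_word wv.2 wv.1.toList t pw 0 h h0
    rw [h.2.2.2.2.1] at this
    exact this.1

theorem pv_inv0 : pvInvT pvTrie0 PySem.Dict.empty := by
  refine ⟨rfl, rfl, rfl, by simp [pvTrie0], rfl, by simp [pvTrie0], rfl, rfl, by simp, ?_, ?_, ?_⟩
  · intro i c j hj
    exfalso
    rcases i with _ | i
    · simp [pvTrie0, PySem.Dict.get?_empty] at hj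
    · simp [pvTrie0, List.getD, PySem.Dict.get?_empty] at hj
  · intro i c _ _ j hj hj2
    simp only [pvTrie0, List.length_cons, List.length_nil] at hj2
    omega
  · intro j hj hj2
    simp only [pvTrie0, List.length_cons, List.length_nil] at hj2
    omega

-- second pass: B's running best weights mirror A's indirect lookups
theorem pv_phase2 (pw : PySem.Dict (List Char) Int) :
    ∀ (l : List (List Char × Int)) (props : PySem.Dict (List Char) (List Char))
      (best : PySem.Dict (List Char) Int),
      (∀ p ∈ l, pw.getD p.1 0 = p.2) →
      (∀ cd, best.get? cd = (props.get? cd).map (fun q => pw.getD q 0)) →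
      (l.foldl (fun st p => pvBSel st (p.2, (p.1.map letter_to_number, p.1))) (best, props)).2
        = l.foldl (fun pr p => pvAStep pw pr p.1) props := by
  intro l
  induction l with
  | nil => intro props best _ _; rfl
  | cons k rest ih =>
    intro props best hmem h
    simp only [List.foldl_cons]
    have hw : pw.getD k.1 0 = k.2 := hmem k (List.mem_cons_self ..)
    have hmem' : ∀ p ∈ rest, pw.getD p.1 0 = p.2 :=
      fun p hp => hmem p (List.mem_cons_of_mem _ hp)
    rcases hp : props.get? (k.1.map letter_to_number) with _ | q
    · have hb : best.get? (k.1.map letter_to_number) = none := by rw [h, hp]; rfl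
      have hAs : pvAStep pw props k.1 = props.insert (k.1.map letter_to_number) k.1 := by
        show (match props.get? (k.1.map letter_to_number) with
              | none => props.insert (k.1.map letter_to_number) k.1
              | some q => if pw.getD q 0 < pw.getD k.1 0
                          then props.insert (k.1.map letter_to_number) k.1 else props) = _
        rw [hp]
      have hBs : pvBSel (best, props) (k.2, (k.1.map letter_to_number, k.1))
          = (best.insert (k.1.map letter_to_number) k.2,
             props.insert (k.1.map letter_to_number) k.1) := by
        show (match best.get? (k.1.map letter_to_number) with
              | none => (best.insert (k.1.map letter_to_number) k.2,
                         props.insert (k.1.map letter_to_number) k.1)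
              | some bw => if bw < k.2
                           then (best.insert (k.1.map letter_to_number) k.2,
                                 props.insert (k.1.map letter_to_number) k.1)
                           else (best, props)) = _
        rw [hb]
      rw [hAs, hBs]
      refine ih _ _ hmem' (fun cd => ?_)
      rw [PySem.Dict.get?_insert, PySem.Dict.get?_insert]
      split
      · simp [hw]
      · exact h cd
    · have hb : best.get? (k.1.map letter_to_number) = some (pw.getD q 0) := by
        rw [h, hp]; rfl
      have hAs : pvAStep pw props k.1
          = if pw.getD q 0 < pw.getD k.1 0
            then props.insert (k.1.map letter_to_number) k.1 else props := by
        show (match props.get? (k.1.map letter_to_number) with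
              | none => props.insert (k.1.map letter_to_number) k.1
              | some q => if pw.getD q 0 < pw.getD k.1 0
                          then props.insert (k.1.map letter_to_number) k.1 else props) = _
        rw [hp]
      have hBs : pvBSel (best, props) (k.2, (k.1.map letter_to_number, k.1))
          = if pw.getD q 0 < k.2
            then (best.insert (k.1.map letter_to_number) k.2,
                  props.insert (k.1.map letter_to_number) k.1)
            else (best, props) := by
        show (match best.get? (k.1.map letter_to_number) with
              | none => (best.insert (k.1.map letter_to_number) k.2,
                         props.insert (k.1.map letter_to_number) k.1)
              | some bw => if bw < k.2
                           then (best.insert (k.1.map letter_to_number) k.2,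
                                 props.insert (k.1.map letter_to_number) k.1)
                           else (best, props)) = _
        rw [hb]
      rw [hAs, hBs, hw]
      split_ifs with hlt
      · refine ih _ _ hmem' (fun cd => ?_)
        rw [PySem.Dict.get?_insert, PySem.Dict.get?_insert]
        split
        · simp [hw]
        · exact h cd
      · exact ih _ _ hmem' h

-- ===== VERDICT (by name: the statement is the Claim_ definition above) =====
theorem build_pref_dict_spec : Claim_equal_build_pref_dict := by
  intro dico _ _
  unfold Spec_build_pref_dict build_pref_dict build_pref_dict_alt
  simp only
  have hinv := pv_phase1 dico pvTrie0 PySem.Dict.empty pv_inv0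
  set t := dico.foldl pvBWord pvTrie0 with ht
  set pw := dico.foldl pvAOuter PySem.Dict.empty with hpw
  obtain ⟨hlpf, hlwt, hlcd, hpos, hpf0, hnd, hcd, hitems, hknd, hsome, hnone, hpar⟩ := hinv
  have hdz : (t.pf.zip t.wt).drop 1 = (t.pf.drop 1).zip (t.wt.drop 1) := pv_drop_one_zip _ _
  have hcdd : t.cd.drop 1 = (t.pf.drop 1).map (List.map letter_to_number) := by
    rw [hcd, List.map_drop]
  have hlen' : (t.pf.drop 1).length = (t.wt.drop 1).length := by
    simp [hlpf, hlwt]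
  have htrip : (t.wt.drop 1).zip ((t.cd.drop 1).zip (t.pf.drop 1))
      = pw.items.map (fun p => (p.2, (p.1.map letter_to_number, p.1))) := by
    rw [hcdd, pv_zip_triple (t.pf.drop 1) (t.wt.drop 1) (List.map letter_to_number) hlen',
      hitems, hdz]
  rw [htrip, List.foldl_map]
  have hmem : ∀ p ∈ pw.items, pw.getD p.1 0 = p.2 := by
    rintro ⟨a, b⟩ hp
    exact PySem.Dict.getD_of_mem_items pw hp hknd 0
  have h2 := pv_phase2 pw pw.items PySem.Dict.empty PySem.Dict.empty hmem (fun cd => rfl)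
  rw [h2]
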